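-- pv_equiv track=rewrite | github.com/SemicolonParen/Guasa | src/main/resources/python/reference_analyzer.py | calculate_object_depth
-- ===== SOURCE A (Python) =====
-- def calculate_object_depth(object_id, reference_graph):
--     visited = set()
--
--     def dfs_depth(node_id, depth):
--         if node_id in visited:
--             return depth
--
--         visited.add(node_id)
--
--         if node_id not in reference_graph or not reference_graph[node_id]:
--             return depth
--
--         max_child_depth = depth
--         for child_id in reference_graph[node_id]:
--             child_depth = dfs_depth(child_id, depth + 1)
--             max_child_depth = max(max_child_depth, child_depth)
--
--         return max_child_depth
--
--     return dfs_depth(object_id, 0)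
-- ===== SOURCE B (Python) =====
-- def calculate_object_depth(object_id, reference_graph):
--     visited = {object_id}
--     children = reference_graph.get(object_id)
--     if not children:
--         return 0
--     # stack frames: (depth, remaining children, running max for this frame)
--     stack = [(0, list(children), 0)]
--     result = 0
--     while stack:
--         depth, rem, acc = stack[-1]
--         if not rem:
--             stack.pop()
--             if stack:
--                 pdepth, prem, pacc = stack[-1]
--                 stack[-1] = (pdepth, prem, max(pacc, acc))
--             else:
--                 result = acc
--             continue
--         child = rem[0]
--         stack[-1] = (depth, rem[1:], acc)
--         if child in visited:
--             stack[-1] = (depth, rem[1:], max(acc, depth + 1))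
--             continue
--         visited.add(child)
--         kids = reference_graph.get(child)
--         if not kids:
--             stack[-1] = (depth, rem[1:], max(acc, depth + 1))
--         else:
--             stack.append((depth + 1, list(kids), depth + 1))
--     return result
-- ===== Notes on version B (the rewrite author's own statement) =====
-- stated objective: alternative
-- what changed: The recursive DFS with an implicit call stack is replaced by an iterative while-loop over an explicit stack of (depth, remaining-children, running-max) frames that folds each finished frame's max into its parent; same visited-set semantics, no recursion (so no RecursionError on deep graphs).
import Mathlib
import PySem

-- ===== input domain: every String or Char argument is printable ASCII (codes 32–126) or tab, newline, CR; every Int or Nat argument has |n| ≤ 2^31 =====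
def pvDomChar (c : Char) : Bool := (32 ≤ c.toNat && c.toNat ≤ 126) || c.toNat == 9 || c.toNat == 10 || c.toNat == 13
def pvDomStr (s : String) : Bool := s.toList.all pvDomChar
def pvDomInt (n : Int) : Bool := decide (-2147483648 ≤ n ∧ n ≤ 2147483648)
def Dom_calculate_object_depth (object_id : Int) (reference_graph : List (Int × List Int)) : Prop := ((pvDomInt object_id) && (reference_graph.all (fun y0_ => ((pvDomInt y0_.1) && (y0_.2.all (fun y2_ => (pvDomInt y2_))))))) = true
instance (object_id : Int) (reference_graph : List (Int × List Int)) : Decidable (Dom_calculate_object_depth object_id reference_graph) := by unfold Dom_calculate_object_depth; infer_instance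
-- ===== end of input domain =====

-- B replaces A's recursive DFS by an iterative explicit-stack DFS (same traversal and visited-set
-- semantics, return value proved equal). Objective: alternative.


-- ===== PORT A =====
-- dict lookup on the association list (first match): 'reference_graph[k]' / 'k in reference_graph'
def getG : List (Int × List Int) → Int → Option (List Int)
  | [], _ => none
  | (a, cs) :: rest, k => if a == k then some cs else getG rest k

mutual
-- dfs_depth; the fuel argument only makes the nested recursion total (calculate_object_depth
-- passes reference_graph.length + 1, enough fuel: every recursing node is a distinct fresh key)
def dfsA (g : List (Int × List Int)) : Nat → Int → Int → PySem.Set Int → Int × PySem.Set Int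
  | 0, _, d, v => (d, v)
  | fuel + 1, n, d, v =>
    if PySem.Set.contains v n then (d, v)
    else
      let v' := PySem.Set.add v n
      match getG g n with
      | none => (d, v')
      | some [] => (d, v')
      | some cs => loopA g fuel cs d v' d
termination_by fuel _ _ _ => (fuel, 0)

-- the 'for child_id in reference_graph[node_id]' loop, state = (max_child_depth, visited)
def loopA (g : List (Int × List Int)) : Nat → List Int → Int → PySem.Set Int → Int → Int × PySem.Set Int
  | _, [], _, v, acc => (acc, v)
  | fuel, c :: cs, d, v, acc =>
    let r := dfsA g fuel c (d + 1) v
    loopA g fuel cs d r.2 (max acc r.1)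
termination_by fuel cs _ _ _ => (fuel, cs.length + 1)
end

def calculate_object_depth (object_id : Int) (reference_graph : List (Int × List Int)) : Int :=
  (dfsA reference_graph (reference_graph.length + 1) object_id 0 PySem.Set.empty).1

-- ===== PORT B =====
-- keys of the graph, as a finite set (used only by the termination measure of the loop)
def keysF (g : List (Int × List Int)) : Finset Int := (g.map Prod.fst).toFinset

-- weight of the not-yet-visited keys (termination measure component)
def unvisF (g : List (Int × List Int)) (v : List Int) : Finset Int :=
  (keysF g).filter (fun k => k ∉ v)

def unvisW (g : List (Int × List Int)) (v : List Int) : Nat :=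
  ∑ k ∈ unvisF g v, (((getG g k).getD []).length + 2)

-- a frame is (depth, remaining children, running max); measure of a machine state
def muB (g : List (Int × List Int)) (stack : List (Int × List Int × Int)) (v : List Int) : Nat :=
  (stack.map (fun f => f.2.1.length + 1)).sum + unvisW g v

theorem getG_some_mem_keysF {g : List (Int × List Int)} {c : Int} {cs : List Int}
    (h : getG g c = some cs) : c ∈ keysF g := by
  induction g with
  | nil => simp [getG] at h
  | cons p rest ih =>
    obtain ⟨a, vs⟩ := p
    by_cases hac : a = c
    · simp [keysF, List.mem_toFinset, hac]
    · simp [getG, hac] at h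
      have := ih h
      simp [keysF, List.mem_toFinset] at this ⊢
      right; exact this

theorem getG_none_not_mem_keysF {g : List (Int × List Int)} {c : Int}
    (h : getG g c = none) : c ∉ keysF g := by
  induction g with
  | nil => simp [keysF]
  | cons p rest ih =>
    obtain ⟨a, vs⟩ := p
    by_cases hac : a = c
    · simp [getG, hac] at h
    · simp [getG, hac] at h
      have := ih h
      simp [keysF, List.mem_toFinset] at this ⊢
      exact ⟨fun he => hac he.symm, this⟩

theorem unvisF_add_of_none {g : List (Int × List Int)} {v : List Int} {c : Int}
    (h : getG g c = none) : unvisF g (PySem.Set.add v c) = unvisF g v := by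
  have hck := getG_none_not_mem_keysF h
  ext k
  simp only [unvisF, Finset.mem_filter, PySem.Set.mem_add]
  constructor
  · rintro ⟨hk, hn⟩; exact ⟨hk, fun hv => hn (Or.inl hv)⟩
  · rintro ⟨hk, hn⟩
    refine ⟨hk, ?_⟩
    rintro (hv | rfl)
    · exact hn hv
    · exact hck hk

theorem unvisF_add_of_key {g : List (Int × List Int)} {v : List Int} {c : Int}
    (hck : c ∈ keysF g) : unvisF g (PySem.Set.add v c) = (unvisF g v).erase c := by
  ext k
  simp only [unvisF, Finset.mem_filter, Finset.mem_erase, PySem.Set.mem_add]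
  constructor
  · rintro ⟨hk, hn⟩
    exact ⟨fun he => hn (Or.inr he), hk, fun hv => hn (Or.inl hv)⟩
  · rintro ⟨hne, hk, hn⟩
    refine ⟨hk, ?_⟩
    rintro (hv | rfl)
    · exact hn hv
    · exact hne rfl

theorem unvisW_add_le (g : List (Int × List Int)) (v : List Int) (c : Int) :
    unvisW g (PySem.Set.add v c) ≤ unvisW g v := by
  cases hg : getG g c with
  | none => unfold unvisW; rw [unvisF_add_of_none hg]
  | some cs =>
    unfold unvisW; rw [unvisF_add_of_key (getG_some_mem_keysF hg)]
    exact Finset.sum_le_sum_of_subset (Finset.erase_subset _ _)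

theorem unvisW_add_key {g : List (Int × List Int)} {v : List Int} {c : Int} {cs : List Int}
    (hg : getG g c = some cs) (hc : c ∉ v) :
    unvisW g (PySem.Set.add v c) + (cs.length + 2) = unvisW g v := by
  have hck := getG_some_mem_keysF hg
  have hmem : c ∈ unvisF g v := by simp [unvisF, hck, hc]
  unfold unvisW
  rw [unvisF_add_of_key hck]
  have h := Finset.sum_erase_add (unvisF g v) (fun k => (((getG g k).getD []).length + 2)) hmem
  simpa [hg] using h

theorem pv_contains_false_iff {v : List Int} {c : Int} :
    PySem.Set.contains v c = false ↔ c ∉ v := by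
  rw [← PySem.Set.contains_iff]
  cases PySem.Set.contains v c <;> simp

-- the while loop of B: stack of frames, visited set, current result
def runB (g : List (Int × List Int)) (stack : List (Int × List Int × Int))
    (v : PySem.Set Int) (res : Int) : Int :=
  match stack with
  | [] => res
  | (d, rem, acc) :: rest =>
    match rem with
    | [] =>
      match rest with
      | [] => runB g [] v acc
      | (pd, prem, pacc) :: rs => runB g ((pd, prem, max pacc acc) :: rs) v res
    | c :: rem' =>
      if hv : PySem.Set.contains v c then
        runB g ((d, rem', max acc (d + 1)) :: rest) v res
      else
        let v' := PySem.Set.add v c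
        match hg : getG g c with
        | none => runB g ((d, rem', max acc (d + 1)) :: rest) v' res
        | some [] => runB g ((d, rem', max acc (d + 1)) :: rest) v' res
        | some gc => runB g ((d + 1, gc, d + 1) :: (d, rem', acc) :: rest) v' res
termination_by muB g stack v
decreasing_by
  all_goals simp [muB]
  · have := unvisW_add_le g v c
    omega
  · have := unvisW_add_le g v c
    omega
  · have hc : c ∉ v := pv_contains_false_iff.mp (by simpa using hv)
    have := unvisW_add_key hg hc
    omega

def calculate_object_depth_alt (object_id : Int) (reference_graph : List (Int × List Int)) : Int :=
  let v := PySem.Set.add PySem.Set.empty object_id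
  match getG reference_graph object_id with
  | none => 0
  | some [] => 0
  | some cs => runB reference_graph [(0, cs, 0)] v 0

-- ===== PRECONDITION & SPEC =====
def Spec_calculate_object_depth (object_id : Int) (reference_graph : List (Int × List Int)) (out : Int) : Prop := out = calculate_object_depth_alt object_id reference_graph
instance (object_id : Int) (reference_graph : List (Int × List Int)) (out : Int) : Decidable (Spec_calculate_object_depth object_id reference_graph out) := by unfold Spec_calculate_object_depth; infer_instance

-- ===== CLAIM (what is proved, stated in full; the proofs are below) =====
def Claim_equal_calculate_object_depth : Prop := ∀ (object_id : Int) (reference_graph : List (Int × List Int)), Dom_calculate_object_depth object_id reference_graph → Spec_calculate_object_depth object_id reference_graph (calculate_object_depth object_id reference_graph)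

-- ===== LEMMAS AND PROOFS =====

-- count of unvisited keys: sufficiency measure for A's fuel
def cardU (g : List (Int × List Int)) (v : List Int) : Nat := (unvisF g v).card

theorem cardU_mono {g : List (Int × List Int)} {v v' : List Int} (h : v ⊆ v') :
    cardU g v' ≤ cardU g v := by
  apply Finset.card_le_card
  intro k hk
  simp only [unvisF, Finset.mem_filter] at hk ⊢
  exact ⟨hk.1, fun hv => hk.2 (h hv)⟩

theorem cardU_add_key_lt {g : List (Int × List Int)} {v : List Int} {c : Int}
    (hck : c ∈ keysF g) (hc : c ∉ v) : cardU g (PySem.Set.add v c) < cardU g v := by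
  rw [cardU, unvisF_add_of_key hck]
  exact Finset.card_erase_lt_of_mem (by simp [unvisF, hck, hc])

theorem cardU_le_length (g : List (Int × List Int)) (v : List Int) :
    cardU g v ≤ g.length := by
  calc cardU g v ≤ (keysF g).card := Finset.card_le_card (Finset.filter_subset _ _)
    _ ≤ (g.map Prod.fst).length := List.toFinset_card_le _
    _ = g.length := List.length_map ..

theorem subset_add (v : List Int) (c : Int) : v ⊆ PySem.Set.add v c := by
  intro x hx; rw [PySem.Set.mem_add]; exact Or.inl hx

theorem loopA_subset_of {g : List (Int × List Int)} {fuel : Nat}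
    (hdfs : ∀ n d v, v ⊆ (dfsA g fuel n d v).2) :
    ∀ cs d (v : PySem.Set Int) acc, v ⊆ (loopA g fuel cs d v acc).2 := by
  intro cs
  induction cs with
  | nil => intro d v acc; simp [loopA]
  | cons c cs ih =>
    intro d v acc
    rw [loopA]
    exact fun x hx => ih d _ _ (hdfs c (d+1) v hx)

theorem dfsA_loopA_subset (g : List (Int × List Int)) :
    ∀ fuel, (∀ n d (v : PySem.Set Int), v ⊆ (dfsA g fuel n d v).2) ∧
      (∀ cs d (v : PySem.Set Int) acc, v ⊆ (loopA g fuel cs d v acc).2) := by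
  intro fuel
  induction fuel with
  | zero =>
    have hdfs : ∀ n d (v : PySem.Set Int), v ⊆ (dfsA g 0 n d v).2 := by
      intro n d v; simp [dfsA]
    exact ⟨hdfs, loopA_subset_of hdfs⟩
  | succ fuel ih =>
    have hdfs : ∀ n d (v : PySem.Set Int), v ⊆ (dfsA g (fuel + 1) n d v).2 := by
      intro n d v
      rw [dfsA]
      split
      · exact fun x hx => hx
      · cases hg : getG g n with
        | none => simpa using subset_add v n
        | some cs =>
          cases cs with
          | nil => simpa using subset_add v n
          | cons c cs' =>
            dsimp only
            exact fun x hx => ih.2 (c :: cs') _ _ _ (subset_add v n hx)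
    exact ⟨hdfs, loopA_subset_of hdfs⟩

-- fuel irrelevance: any two sufficient fuels give the same result
theorem fuel_irrel (g : List (Int × List Int)) :
    ∀ f1, (∀ f2 n d (v : PySem.Set Int), cardU g v < f1 → cardU g v < f2 →
            dfsA g f1 n d v = dfsA g f2 n d v) ∧
          (∀ f2 cs d (v : PySem.Set Int) acc, cardU g v < f1 → cardU g v < f2 →
            loopA g f1 cs d v acc = loopA g f2 cs d v acc) := by
  intro f1
  induction f1 using Nat.strong_induction_on with
  | _ f1 IH =>
    have hdfs : ∀ f2 n d (v : PySem.Set Int), cardU g v < f1 → cardU g v < f2 →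
        dfsA g f1 n d v = dfsA g f2 n d v := by
      intro f2 n d v h1 h2
      obtain ⟨m1, rfl⟩ : ∃ m1, f1 = m1 + 1 := ⟨f1 - 1, by omega⟩
      obtain ⟨m2, rfl⟩ : ∃ m2, f2 = m2 + 1 := ⟨f2 - 1, by omega⟩
      rw [dfsA, dfsA]
      split
      · rfl
      · rename_i hv
        cases hg : getG g n with
        | none => simp
        | some cs =>
          cases cs with
          | nil => simp
          | cons c cs' =>
            dsimp only
            have hck := getG_some_mem_keysF hg
            have hc : n ∉ v := pv_contains_false_iff.mp (by simpa using hv)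
            have hlt := cardU_add_key_lt hck hc
            exact (IH m1 (by omega)).2 m2 (c :: cs') d _ d (by omega) (by omega)
    have hloop : ∀ f2 cs d (v : PySem.Set Int) acc, cardU g v < f1 → cardU g v < f2 →
        loopA g f1 cs d v acc = loopA g f2 cs d v acc := by
      intro f2 cs
      induction cs with
      | nil => intro d v acc h1 h2; rw [loopA, loopA]
      | cons c cs ih =>
        intro d v acc h1 h2
        rw [loopA, loopA]
        rw [← hdfs f2 c (d+1) v h1 h2]
        have hsub := (dfsA_loopA_subset g f1).1 c (d+1) v
        have hle := cardU_mono (g := g) hsub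
        exact ih d _ _ (by omega) (by omega)
    exact ⟨hdfs, hloop⟩

-- unfolding lemmas for dfsA
theorem dfsA_visited {g : List (Int × List Int)} {n d : Int} {v : PySem.Set Int}
    (hv : PySem.Set.contains v n = true) (fuel : Nat) : dfsA g fuel n d v = (d, v) := by
  cases fuel with
  | zero => rw [dfsA]
  | succ m =>
    have hn : n ∈ v := (PySem.Set.contains_iff _ _).mp hv
    rw [dfsA]; simp [hn]

theorem dfsA_leaf {g : List (Int × List Int)} {n d : Int} {v : PySem.Set Int}
    (hv : PySem.Set.contains v n = false)
    (hg : getG g n = none ∨ getG g n = some []) (m : Nat) :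
    dfsA g (m + 1) n d v = (d, PySem.Set.add v n) := by
  have hn : n ∉ v := pv_contains_false_iff.mp hv
  rw [dfsA]
  rcases hg with hg | hg <;> simp [hn, hg]

theorem dfsA_node {g : List (Int × List Int)} {n d : Int} {v : PySem.Set Int}
    {c : Int} {cs' : List Int}
    (hv : PySem.Set.contains v n = false) (hg : getG g n = some (c :: cs')) (m : Nat) :
    dfsA g (m + 1) n d v = loopA g m (c :: cs') d (PySem.Set.add v n) d := by
  have hn : n ∉ v := pv_contains_false_iff.mp hv
  rw [dfsA]; simp [hn, hg]

-- denotation of the rest of B's stack, in terms of A's loop at fuel F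
def unwindA (g : List (Int × List Int)) (F : Nat) :
    List (Int × List Int × Int) → PySem.Set Int → Int → Int
  | [], _, val => val
  | (pd, prem, pacc) :: rs, v, val =>
    let r := loopA g F prem pd v (max pacc val)
    unwindA g F rs r.2 r.1

-- the machine computes exactly the recursive semantics of its stack
theorem runB_sim (g : List (Int × List Int)) (stack : List (Int × List Int × Int))
    (v : PySem.Set Int) (res : Int) :
    runB g stack v res =
      (match stack with
       | [] => res
       | (d, rem, acc) :: rest =>
         unwindA g (g.length + 1) rest (loopA g (g.length + 1) rem d v acc).2
           (loopA g (g.length + 1) rem d v acc).1) := by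
  fun_induction runB g stack v res with
  | case1 v res => rfl
  | case2 v res pd pacc ih =>
    rw [ih]
    simp [loopA, unwindA]
  | case3 v res pd pacc pd1 prem pacc1 rs ih =>
    rw [ih]
    simp [loopA, unwindA]
  | case4 v res pd pacc rs c rem' hv ih =>
    rw [ih]
    dsimp only
    have h1 : loopA g (g.length + 1) (c :: rem') pd v pacc
        = loopA g (g.length + 1) rem' pd v (max pacc (pd + 1)) := by
      rw [loopA, dfsA_visited hv]
    rw [h1]
  | case5 v res pd pacc rs c rem' hv v' hg ih =>
    rw [ih]
    dsimp only
    have h1 : loopA g (g.length + 1) (c :: rem') pd v pacc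
        = loopA g (g.length + 1) rem' pd (PySem.Set.add v c) (max pacc (pd + 1)) := by
      rw [loopA, dfsA_leaf (by simpa using hv) (Or.inl hg)]
    rw [h1]
  | case6 v res pd pacc rs c rem' hv v' hg ih =>
    rw [ih]
    dsimp only
    have h1 : loopA g (g.length + 1) (c :: rem') pd v pacc
        = loopA g (g.length + 1) rem' pd (PySem.Set.add v c) (max pacc (pd + 1)) := by
      rw [loopA, dfsA_leaf (by simpa using hv) (Or.inr hg)]
    rw [h1]
  | case7 v res pd pacc rs c rem' hv v' gc hne hg ih =>
    rw [ih]
    dsimp only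
    have hck := getG_some_mem_keysF hg
    have hc : c ∉ v := pv_contains_false_iff.mp (by simpa using hv)
    have hlt := cardU_add_key_lt hck hc
    have hle := cardU_le_length g v
    have h1 : loopA g (g.length + 1) (c :: rem') pd v pacc
        = loopA g (g.length + 1) rem' pd
            (loopA g (g.length + 1) gc (pd + 1) (PySem.Set.add v c) (pd + 1)).2
            (max pacc (loopA g (g.length + 1) gc (pd + 1) (PySem.Set.add v c) (pd + 1)).1) := by
      rw [loopA]
      cases gc with
      | nil => exact absurd rfl hne
      | cons c0 gc' =>
        rw [dfsA_node (by simpa using hv) hg]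
        rw [(fuel_irrel g (g.length)).2 (g.length + 1) (c0 :: gc') (pd + 1)
              (PySem.Set.add v c) (pd + 1) (by omega) (by omega)]
    rw [h1]
    simp only [unwindA]
    rfl

-- ===== VERDICT (by name: the statement is the Claim_ definition above) =====
theorem calculate_object_depth_spec : Claim_equal_calculate_object_depth := by
  unfold Claim_equal_calculate_object_depth
  intro oid g _
  unfold Spec_calculate_object_depth calculate_object_depth calculate_object_depth_alt
  have hv0 : PySem.Set.contains (PySem.Set.empty : PySem.Set Int) oid = false :=
    pv_contains_false_iff.mpr (by simp [PySem.Set.empty])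
  cases hg : getG g oid with
  | none => rw [dfsA_leaf hv0 (Or.inl hg)]
  | some cs =>
    cases cs with
    | nil => rw [dfsA_leaf hv0 (Or.inr hg)]
    | cons c cs' =>
      rw [dfsA_node hv0 hg]
      dsimp only
      rw [runB_sim]
      simp only [unwindA]
      have hck := getG_some_mem_keysF hg
      have hc : oid ∉ (PySem.Set.empty : PySem.Set Int) := by simp [PySem.Set.empty]
      have hlt := cardU_add_key_lt hck hc
      have hle := cardU_le_length g (PySem.Set.empty : PySem.Set Int)
      rw [(fuel_irrel g (g.length)).2 (g.length + 1) (c :: cs') 0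
            (PySem.Set.add PySem.Set.empty oid) 0 (by omega) (by omega)]
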